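/- GENERATED by mk_final_copies.py from the proof of the farm's unit `put_header` (farm:put_header.1: Proof.lean) as the
   re-elaboration sweep compiled it — do not edit. -/
import Asan.CheckWalk
import Vorbis.Spec.Units.put_header

open X86 X86.User Asan Vorbis

set_option maxRecDepth 4000
set_option maxHeartbeats 4000000

/-- `put_header(hdr, status, err, channels, rate, frames, stored)` satisfies its contract: six pushes, eight checked 4-byte
stores `hdr[0 .. 8)` (each check is "inside the 32 live bytes at `hdr`", with no store so far into the shadow), one load of
the seventh argument from the caller's frame, six pops, `ret`. Straight-line code: ONE walk. -/
theorem Vorbis.Spec.Worked.put_header_ok : Vorbis.Spec.put_header.Statement := by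
  intro Lay hLay μ hμ u₀ hcode hstore4 others frames u ret he hpre
  v_entry he
  obtain ⟨hsh, hlive, hstk⟩ := hpre
  -- where `hdr[0 .. 8)` is: one arithmetic fact (inside the data space, off the text, off this function's stack)
  have hsp := hsh.rsp
  have hwhere := hlive.where_ hsh.inv hsh.offText (by decide) (by u_omega)
  -- 0x103360 … 0x1033fa (shim.c:43–52): the whole function
  u_walk hcode [hμ.vendor] span [Vorbis.L.textLo, Vorbis.L.textHi] side (v_side)
  case check_103380 =>
    -- 0x103380 (shim.c:44 hdr[0] = (unsigned int) status): the four bytes at `hdr + 0` lie inside the 32 live bytes; the shadow is untouched so far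
    have hun : ShadowUntouched u.mem s_103380.mem := by
      v_untouched
    refine hlive.accSmall hsh.inv hun _ 4 (by decide) ?_ ?_
    · u_omega
    · u_omega
  case check_10338c =>
    -- 0x10338c (shim.c:45 hdr[1] = (unsigned int) err): the four bytes at `hdr + 4` lie inside the 32 live bytes; the shadow is untouched so far
    have hun : ShadowUntouched u.mem s_10338c.mem := by
      v_untouched
    refine hlive.accSmall hsh.inv hun _ 4 (by decide) ?_ ?_
    · u_omega
    · u_omega
  case check_103399 =>
    -- 0x103399 (shim.c:46 hdr[2] = (unsigned int) channels): the four bytes at `hdr + 8` lie inside the 32 live bytes; the shadow is untouched so far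
    have hun : ShadowUntouched u.mem s_103399.mem := by
      v_untouched
    refine hlive.accSmall hsh.inv hun _ 4 (by decide) ?_ ?_
    · u_omega
    · u_omega
  case check_1033a6 =>
    -- 0x1033a6 (shim.c:47 hdr[3] = rate): the four bytes at `hdr + 12` lie inside the 32 live bytes; the shadow is untouched so far
    have hun : ShadowUntouched u.mem s_1033a6.mem := by
      v_untouched
    refine hlive.accSmall hsh.inv hun _ 4 (by decide) ?_ ?_
    · u_omega
    · u_omega
  case check_1033b3 =>
    -- 0x1033b3 (shim.c:48 hdr[4] = (unsigned int) frames): the four bytes at `hdr + 16` lie inside the 32 live bytes; the shadow is untouched so far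
    have hun : ShadowUntouched u.mem s_1033b3.mem := by
      v_untouched
    refine hlive.accSmall hsh.inv hun _ 4 (by decide) ?_ ?_
    · u_omega
    · u_omega
  case check_1033bf =>
    -- 0x1033bf (shim.c:49 hdr[5] = (unsigned int) stored): the four bytes at `hdr + 20` lie inside the 32 live bytes; the shadow is untouched so far
    have hun : ShadowUntouched u.mem s_1033bf.mem := by
      v_untouched
    refine hlive.accSmall hsh.inv hun _ 4 (by decide) ?_ ?_
    · u_omega
    · u_omega
  case check_1033d0 =>
    -- 0x1033d0 (shim.c:50 hdr[6] = 0): the four bytes at `hdr + 24` lie inside the 32 live bytes; the shadow is untouched so far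
    have hun : ShadowUntouched u.mem s_1033d0.mem := by
      v_untouched
    refine hlive.accSmall hsh.inv hun _ 4 (by decide) ?_ ?_
    · u_omega
    · u_omega
  case check_1033e0 =>
    -- 0x1033e0 (shim.c:51 hdr[7] = 0): the four bytes at `hdr + 28` lie inside the 32 live bytes; the shadow is untouched so far
    have hun : ShadowUntouched u.mem s_1033e0.mem := by
      v_untouched
    refine hlive.accSmall hsh.inv hun _ 4 (by decide) ?_ ?_
    · u_omega
    · u_omega
  case cont =>
    -- 0x1033fa (shim.c:52): the state after the `ret`: the contract's `Returned`
    refine ReachVia.done ?_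
    v_returned
    -- the post: no store went to the shadow
    show ShadowUntouched u.mem s_1033fa.mem
    v_untouched
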